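-- pv_equiv track=rewrite | github.com/444chak/adventofcode | adventofcode24/day4/day4.py | search_horizontal
-- ===== SOURCE A (Python) =====
-- def search_horizontal(data, word):
--     count = 0
--     for line in data:
--         start = 0
--         while start < len(line):
--             pos = line.find(word, start)
--             if pos == -1:
--                 break
--             count += 1
--             start = pos + 1
--     return count
-- ===== SOURCE B (Python) =====
-- def search_horizontal(data, word):
--     target = list(word)
--     n = len(target)
--     count = 0
--     for line in data:
--         window = []
--         for ch in line:
--             window.append(ch)
--             if n < len(window):
--                 window.pop(0)
--             if window == target:
--                 count += 1
--     return count
-- ===== Notes on version B (the rewrite author's own statement) =====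
-- stated objective: alternative
-- what changed: Replaces per-position find-and-skip substring search with an online streaming matcher: one pass over each line's characters maintaining a sliding buffer of the last len(word) characters and counting whenever the buffer equals the word.
import Mathlib
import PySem

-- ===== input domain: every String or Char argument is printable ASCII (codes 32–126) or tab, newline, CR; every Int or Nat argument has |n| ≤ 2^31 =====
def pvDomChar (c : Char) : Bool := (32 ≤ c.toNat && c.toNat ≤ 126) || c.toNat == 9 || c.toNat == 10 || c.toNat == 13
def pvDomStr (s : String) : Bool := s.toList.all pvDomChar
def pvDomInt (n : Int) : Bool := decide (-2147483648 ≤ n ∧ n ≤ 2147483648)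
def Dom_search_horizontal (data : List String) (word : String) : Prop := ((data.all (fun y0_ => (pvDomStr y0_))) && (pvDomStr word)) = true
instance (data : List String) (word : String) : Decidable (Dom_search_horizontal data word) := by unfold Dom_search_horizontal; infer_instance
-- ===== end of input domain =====

-- B replaces A's find-and-skip loop by an online streaming matcher: one pass over each
-- line's characters keeping a sliding buffer of the last |word| characters (alternative
-- algorithm, same cost).

-- ===== PORT A =====
-- inner while loop of A: 'while start < len(line): pos = line.find(word, start); if pos == -1: break; count += 1; start = pos + 1'
def pvLineA (line word : List Char) (start : Nat) : Int :=
  if h : start < line.length then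
    let pos := PySem.Chars.findFrom line word (start : Int) none
    if hp : pos = -1 then 0
    else 1 + pvLineA line word (pos.toNat + 1)
  else 0
termination_by line.length - start
decreasing_by
  have hs := (PySem.Chars.findFrom_natCast_spec line word start (Nat.le_of_lt h) hp).1
  omega

def search_horizontal (data : List String) (word : String) : Int :=
  data.foldl (fun count line => count + pvLineA line.toList word.toList 0) 0

-- ===== PORT B =====
-- body of B's inner for loop: 'window.append(ch); if n < len(window): window.pop(0); if window == target: count += 1'
-- (window.pop(0) discards the first element: the guard makes the list nonempty, so it is List.tail)
def pvStepB (n : Nat) (target : List Char) (st : List Char × Int) (ch : Char) : List Char × Int :=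
  let w1 := st.1 ++ [ch]
  let w2 := if n < w1.length then w1.tail else w1
  (w2, st.2 + if w2 == target then 1 else 0)

def search_horizontal_alt (data : List String) (word : String) : Int :=
  let target := word.toList
  let n := target.length
  data.foldl (fun count line => (line.toList.foldl (pvStepB n target) ([], count)).2) 0

-- ===== PRECONDITION & SPEC =====
def Spec_search_horizontal (data : List String) (word : String) (out : Int) : Prop := out = search_horizontal_alt data word
instance (data : List String) (word : String) (out : Int) : Decidable (Spec_search_horizontal data word out) := by unfold Spec_search_horizontal; infer_instance

-- ===== CLAIM (what is proved, stated in full; the proofs are below) =====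
def Claim_equal_search_horizontal : Prop := ∀ (data : List String) (word : String), Dom_search_horizontal data word → Spec_search_horizontal data word (search_horizontal data word)

-- ===== LEMMAS AND PROOFS =====

-- A's inner loop counts the match positions in [start, line.length)
lemma pvLineA_count (line word : List Char) :
    ∀ n start, line.length - start = n → start ≤ line.length →
      pvLineA line word start
        = ((List.Ico start line.length).countP (fun i => decide (word <+: line.drop i)) : Nat) := by
  intro n
  induction n using Nat.strong_induction_on with
  | _ n ih =>
    intro start hn hle
    rw [pvLineA]
    by_cases h : start < line.length
    · simp only [dif_pos h]
      by_cases hp : PySem.Chars.findFrom line word (start : Int) none = -1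
      · simp only [dif_pos hp]
        have hno := (PySem.Chars.findFrom_natCast_eq_neg_one_iff line word start hle).mp hp
        have hz : (List.Ico start line.length).countP
            (fun i => decide (word <+: line.drop i)) = 0 := by
          rw [List.countP_eq_zero]
          intro i hi
          simp only [decide_eq_true_eq]
          intro hpre
          rw [List.Ico.mem] at hi
          apply hno
          have hdd : line.drop i = (line.drop start).drop (i - start) := by
            rw [List.drop_drop]; congr 1; omega
          rw [hdd] at hpre
          exact List.infix_iff_prefix_suffix.mpr ⟨_, hpre, List.drop_suffix _ _⟩
        rw [hz]; rfl
      · simp only [dif_neg hp]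
        obtain ⟨h1, h2, h3⟩ := PySem.Chars.findFrom_natCast_spec line word start hle hp
        set pos := PySem.Chars.findFrom line word (start : Int) none with hpos
        have hsp : start ≤ pos.toNat := by omega
        have hplt : pos.toNat < line.length := by
          by_cases hw : word = []
          · rw [PySem.Chars.findFrom_natCast line word start hle] at hpos
            simp [hw, PySem.Chars.find_nil] at hpos
            omega
          · have hw1 : 1 ≤ word.length := by
              cases word with
              | nil => exact absurd rfl hw
              | cons c w => simp
            have := h2.length_le
            simp [List.length_drop] at this
            omega
        rw [show pvLineA line word (pos.toNat + 1)
              = ((List.Ico (pos.toNat + 1) line.length).countP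
                  (fun i => decide (word <+: line.drop i)) : Nat) from
            ih (line.length - (pos.toNat + 1)) (by omega) _ rfl (by omega)]
        have hsplit : List.Ico start line.length
            = List.Ico start pos.toNat ++ List.Ico pos.toNat line.length :=
          (List.Ico.append_consecutive hsp (Nat.le_of_lt hplt)).symm
        have hcons : List.Ico pos.toNat line.length
            = pos.toNat :: List.Ico (pos.toNat + 1) line.length := by
          rw [List.Ico.eq_cons hplt]
        have hzero : (List.Ico start pos.toNat).countP
            (fun i => decide (word <+: line.drop i)) = 0 := by
          rw [List.countP_eq_zero]
          intro i hi
          rw [List.Ico.mem] at hi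
          simp only [decide_eq_true_eq]
          exact h3 i hi.1 hi.2
        rw [hsplit, List.countP_append, hzero, hcons, List.countP_cons]
        simp [h2]
        ring
    · simp only [dif_neg h]
      have : start = line.length := by omega
      rw [this, List.Ico.self_empty]
      rfl

-- the sliding window after consuming `pre` is the last n characters of `pre`
lemma window_step (n : Nat) (pre : List Char) (ch : Char) :
    (if n < (pre.drop (pre.length - n) ++ [ch]).length
       then (pre.drop (pre.length - n) ++ [ch]).tail
       else pre.drop (pre.length - n) ++ [ch])
      = (pre ++ [ch]).drop ((pre ++ [ch]).length - n) := by
  by_cases hn : n ≤ pre.length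
  · have hlen : (pre.drop (pre.length - n)).length = n := by
      simp [List.length_drop]; omega
    rw [if_pos (by simp [hlen])]
    rcases Nat.eq_zero_or_pos n with hz | hpos
    · subst hz
      simp
    · have hne : pre.drop (pre.length - n) ≠ [] := by
        intro h; have := congrArg List.length h; simp [hlen] at this; omega
      rw [List.tail_append_of_ne_nil hne, List.tail_drop,
          show (pre ++ [ch]).length - n = (pre.length - n + 1) by simp; omega,
          List.drop_append_of_le_length (by omega)]
  · push Not at hn
    rw [if_neg (by simp [List.length_drop]; omega)]
    rw [show pre.length - n = 0 by omega, show (pre ++ [ch]).length - n = 0 by simp; omega]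
    simp

-- number of end positions j in rest with word a suffix of pre ++ rest.take (j+1)
def pvCountEnds (target pre rest : List Char) : Int :=
  match rest with
  | [] => 0
  | ch :: rest' =>
      (if target.isSuffixOf (pre ++ [ch]) then (1 : Int) else 0)
        + pvCountEnds target (pre ++ [ch]) rest'

-- B's inner fold counts end positions
lemma foldB_count (target : List Char) :
    ∀ (rest pre : List Char) (c : Int),
      (rest.foldl (pvStepB target.length target) (pre.drop (pre.length - target.length), c)).2
        = c + pvCountEnds target pre rest := by
  intro rest
  induction rest with
  | nil => intro pre c; simp [pvCountEnds]
  | cons ch rest ih =>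
    intro pre c
    rw [List.foldl_cons]
    have hstep : pvStepB target.length target (pre.drop (pre.length - target.length), c) ch
        = ((pre ++ [ch]).drop ((pre ++ [ch]).length - target.length),
           c + if target.isSuffixOf (pre ++ [ch]) then 1 else 0) := by
      unfold pvStepB
      simp only [window_step]
      have hb : ((pre ++ [ch]).drop ((pre ++ [ch]).length - target.length) == target)
          = target.isSuffixOf (pre ++ [ch]) := by
        rw [Bool.eq_iff_iff, beq_iff_eq, List.isSuffixOf_iff_suffix]
        constructor
        · intro he
          exact List.suffix_iff_eq_drop.mpr he.symm
        · intro h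
          exact (List.suffix_iff_eq_drop.mp h).symm
      rw [hb]
    rw [hstep, ih (pre ++ [ch])]
    show c + _ + pvCountEnds target (pre ++ [ch]) rest
        = c + pvCountEnds target pre (ch :: rest)
    rw [pvCountEnds]
    ring

-- countP over range (m+1), split off index 0
lemma countP_range_succ_shift (m : Nat) (p : Nat → Bool) :
    (List.range (m + 1)).countP p
      = ((if p 0 then 1 else 0) + (List.range m).countP (fun j => p (j + 1))) := by
  rw [List.range_succ_eq_map, List.countP_cons, List.countP_map]
  cases h : p 0 <;> simp [Function.comp_def, Nat.succ_eq_add_one, Nat.add_comm]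

-- pvCountEnds counts the end positions j of rest with target a suffix of pre ++ rest.take (j+1)
lemma pvCountEnds_count (target : List Char) :
    ∀ (rest pre : List Char),
      pvCountEnds target pre rest
        = ((List.range rest.length).countP
            (fun j => target.isSuffixOf (pre ++ rest.take (j + 1))) : Nat) := by
  intro rest
  induction rest with
  | nil => intro pre; simp [pvCountEnds]
  | cons ch rest ih =>
    intro pre
    rw [pvCountEnds, ih (pre ++ [ch]), List.length_cons, countP_range_succ_shift]
    have hfun : (fun j => target.isSuffixOf ((pre ++ [ch]) ++ List.take (j + 1) rest))
        = (fun j => target.isSuffixOf (pre ++ List.take (j + 1 + 1) (ch :: rest))) := by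
      funext j
      simp [List.append_assoc]
    rw [hfun]
    simp only [List.take_succ_cons, List.take_zero]
    push_cast
    by_cases h0 : target.isSuffixOf (pre ++ [ch])
    · simp [h0]
    · simp [h0]

-- list-countP over range as a Finset-filter cardinality
lemma countP_range_card (m : Nat) (p : Nat → Bool) :
    (List.range m).countP p = ((Finset.range m).filter (fun i => p i = true)).card := by
  simp [Finset.range, Finset.card, Finset.filter, Multiset.range, List.countP_eq_length_filter]

-- end positions and start positions are in bijection (shift by |target| - 1)
lemma ends_eq_starts (line target : List Char) :
    (List.range line.length).countP (fun j => target.isSuffixOf (List.take (j + 1) line))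
      = (List.range line.length).countP (fun i => decide (target <+: line.drop i)) := by
  rcases Nat.eq_zero_or_pos target.length with hz | hpos
  · have ht : target = [] := List.length_eq_zero_iff.mp hz
    subst ht
    simp [List.nil_prefix]
  · rw [countP_range_card, countP_range_card]
    apply Finset.card_bij (fun j _ => j + 1 - target.length)
    · intro j hj
      simp only [Finset.mem_filter, Finset.mem_range, List.isSuffixOf_iff_suffix] at hj ⊢
      obtain ⟨hjl, hsuf⟩ := hj
      have hlen : target.length ≤ (List.take (j + 1) line).length := hsuf.length_le
      have htl : (List.take (j + 1) line).length = j + 1 := by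
        simp [List.length_take]
        omega
      rw [htl] at hlen
      constructor
      · omega
      · have hd := List.suffix_iff_eq_drop.mp hsuf
        rw [htl] at hd
        rw [List.drop_take] at hd
        have hn : j + 1 - (j + 1 - target.length) = target.length := by omega
        rw [hn] at hd
        simp only [decide_eq_true_eq]
        rw [List.prefix_iff_eq_take]
        exact hd
    · intro a ha b hb hab
      simp only [Finset.mem_filter, Finset.mem_range, List.isSuffixOf_iff_suffix] at ha hb
      have hla : target.length ≤ a + 1 := by
        have := ha.2.length_le
        simp [List.length_take] at this
        omega
      have hlb : target.length ≤ b + 1 := by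
        have := hb.2.length_le
        simp [List.length_take] at this
        omega
      omega
    · intro i hi
      simp only [Finset.mem_filter, Finset.mem_range, decide_eq_true_eq] at hi
      obtain ⟨hil, hpre⟩ := hi
      have hfit : i + target.length ≤ line.length := by
        have := hpre.length_le
        simp [List.length_drop] at this
        omega
      refine ⟨i + target.length - 1, ?_, ?_⟩
      · simp only [Finset.mem_filter, Finset.mem_range, List.isSuffixOf_iff_suffix]
        constructor
        · omega
        · have hj1 : i + target.length - 1 + 1 = i + target.length := by omega
          rw [hj1, List.suffix_iff_eq_drop]
          have htl : (List.take (i + target.length) line).length = i + target.length := by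
            simp [List.length_take]; omega
          rw [htl, show i + target.length - target.length = i by omega, List.drop_take,
              show i + target.length - i = target.length by omega]
          exact List.prefix_iff_eq_take.mp hpre
      · omega

-- pvCountEnds with empty prefix counts the start positions (A's count)
lemma pvCountEnds_eq_start (line target : List Char) :
    pvCountEnds target [] line
      = ((List.range line.length).countP (fun i => decide (target <+: line.drop i)) : Nat) := by
  rw [pvCountEnds_count target line [], ← ends_eq_starts]
  simp

lemma pvLine_eq (line word : List Char) (c : Int) :
    c + pvLineA line word 0 = (line.foldl (pvStepB word.length word) ([], c)).2 := by
  have hb := foldB_count word line [] c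
  simp only [List.drop_nil, List.length_nil, Nat.zero_sub] at hb
  rw [hb, pvLineA_count line word (line.length - 0) 0 rfl (Nat.zero_le _),
      List.Ico.zero_bot, ← pvCountEnds_eq_start]

-- ===== VERDICT (by name: the statement is the Claim_ definition above) =====
theorem search_horizontal_spec : Claim_equal_search_horizontal := by
  intro data word _
  unfold Spec_search_horizontal search_horizontal search_horizontal_alt
  congr 1
  funext c line
  exact pvLine_eq line.toList word.toList c
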